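-- pv_equiv track=rewrite | github.com/stefanopalmieri/Kamea | h_characterization_sat.py | has_any_representable_composition
-- ===== SOURCE A (Python) =====
-- def has_any_representable_composition(table, n=10):
--     """
--     Does ANY non-trivial two-element composition factor through a single element?
--     ∃ a, b, c ∈ core: a·x = c·(b·x) for all x in core
--     (no inertness requirement on b)
--     """
--     core = list(range(2, n))
--
--     # Build row lookup
--     row_to_elem = {}
--     for a in range(n):
--         r = tuple(table[a][x] for x in core)
--         if r not in row_to_elem:
--             row_to_elem[r] = a
--
--     for c in core:
--         for b in core:
--             if c == b:
--                 continue
--             comp = tuple(table[c][table[b][x]] for x in core)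
--             if comp in row_to_elem:
--                 a = row_to_elem[comp]
--                 if a not in {0, 1} and a != b and a != c:
--                     return True, (a, b, c)
--     return False, None
-- ===== SOURCE B (Python) =====
-- def has_any_representable_composition(table, n=10):
--     """Same search, but the row_to_elem dict is gone: for each (c, b) pair we
--     scan a = 0..n-1 and take the first a whose core-row equals the composed
--     row (first match = what the dict's keep-first insert recorded)."""
--     core = list(range(2, n))
--     for c in core:
--         for b in core:
--             if c == b:
--                 continue
--             comp = tuple(table[c][table[b][x]] for x in core)
--             for a in range(n):
--                 if tuple(table[a][x] for x in core) == comp: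
--                     if a not in (0, 1) and a != b and a != c:
--                         return True, (a, b, c)
--                     break
--     return False, None
-- ===== Notes on version B (the rewrite author's own statement) =====
-- stated objective: alternative
-- what changed: Removed the precomputed row-to-element dictionary; B finds the representing element a by scanning rows for the first match per candidate pair.
-- outside the precondition, e.g. on has_any_representable_composition([[0, 0, 0, 0], [0, 0, 0, 0], [0, 0, 3, 0]], 3): A returns (False, None), B returns (False, None)
import Mathlib
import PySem

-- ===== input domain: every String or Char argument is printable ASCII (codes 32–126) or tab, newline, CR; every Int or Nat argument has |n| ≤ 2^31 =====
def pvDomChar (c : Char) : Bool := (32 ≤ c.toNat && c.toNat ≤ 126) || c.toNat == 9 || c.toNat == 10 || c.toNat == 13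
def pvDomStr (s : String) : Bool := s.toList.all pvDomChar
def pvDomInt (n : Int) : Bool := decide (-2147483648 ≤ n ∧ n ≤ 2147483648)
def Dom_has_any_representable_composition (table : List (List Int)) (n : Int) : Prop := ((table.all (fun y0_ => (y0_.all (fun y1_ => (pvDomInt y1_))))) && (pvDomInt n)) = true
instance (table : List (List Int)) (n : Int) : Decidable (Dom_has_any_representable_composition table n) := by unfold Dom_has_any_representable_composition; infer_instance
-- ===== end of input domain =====

-- B removes A's row->element dictionary: for each (c,b) pair it scans rows for the
-- first a whose core-row equals the composed row (alternative decomposition, not faster).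


-- ===== PORT A =====
-- table[a][x] as an Int; total via getD, exact on Pre_ (all accesses in range there)
def pvT (table : List (List Int)) (a x : Int) : Int :=
  (PySem.List.pyGet? ((PySem.List.pyGet? table a).getD []) x).getD 0

-- r = tuple(table[a][x] for x in core)
def pvRowA (table : List (List Int)) (core : List Int) (a : Int) : List Int :=
  core.map (fun x => pvT table a x)

-- the 'row_to_elem' build loop: insert only if the row key is absent
def pvDictA (table : List (List Int)) (n : Int) (core : List Int) :
    PySem.Dict (List Int) Int :=
  (PySem.List.pyRange 0 n 1).foldl
    (fun d a => if d.contains (pvRowA table core a) then d else d.insert (pvRowA table core a) a)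
    PySem.Dict.empty

def has_any_representable_composition (table : List (List Int)) (n : Int) :
    Bool × (Option (Int × Int × Int)) :=
  let core := PySem.List.pyRange 2 n 1
  let d := pvDictA table n core
  match core.findSome? (fun c => core.findSome? (fun b =>
    if c = b then none
    else
      let comp := core.map (fun x => pvT table c (pvT table b x))
      match d.get? comp with
      | some a => if a ≠ 0 ∧ a ≠ 1 ∧ a ≠ b ∧ a ≠ c then some (a, b, c) else none
      | none => none)) with
  | some t => (true, some t)
  | none => (false, none)

-- ===== PORT B =====
def has_any_representable_composition_alt (table : List (List Int)) (n : Int) :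
    Bool × (Option (Int × Int × Int)) :=
  let core := PySem.List.pyRange 2 n 1
  match core.findSome? (fun c => core.findSome? (fun b =>
    if c = b then none
    else
      let comp := core.map (fun x => pvT table c (pvT table b x))
      -- inner 'for a in range(n)' scan to the first matching row, then break
      match (PySem.List.pyRange 0 n 1).find?
          (fun a => core.map (fun x => pvT table a x) == comp) with
      | some a => if a ≠ 0 ∧ a ≠ 1 ∧ a ≠ b ∧ a ≠ c then some (a, b, c) else none
      | none => none)) with
  | some t => (true, some t)
  | none => (false, none)

-- ===== PRECONDITION & SPEC =====
-- Pre_ is the natural Cayley-table domain: for n > 2, at least n rows, each of the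
-- first n rows of length ≥ n, and every entry used as an index (rows 2..n-1,
-- positions 2..n-1) in [-n, n) (negative Python indices wrap).  This excludes inputs
-- where A raises IndexError, and (narrowing, see cites) a few inputs with an
-- out-of-range entry on which A still returns because that entry is never dereferenced.
def Pre_has_any_representable_composition (table : List (List Int)) (n : Int) : Prop :=
  2 < n →
    (n ≤ (table.length : Int) ∧
     (∀ row ∈ table.take n.toNat, n ≤ (row.length : Int)) ∧
     ∀ row ∈ (table.take n.toNat).drop 2, ∀ v ∈ (row.take n.toNat).drop 2, -n ≤ v ∧ v < n)
instance (table : List (List Int)) (n : Int) : Decidable (Pre_has_any_representable_composition table n) := by unfold Pre_has_any_representable_composition; infer_instance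

def pvWitness_has_any_representable_composition : List (List Int) × Int :=
  ([[0, 0, 0], [0, 0, 0], [0, 0, 2]], 3)

def Spec_has_any_representable_composition (table : List (List Int)) (n : Int) (out : Bool × (Option (Int × Int × Int))) : Prop := out = has_any_representable_composition_alt table n
instance (table : List (List Int)) (n : Int) (out : Bool × (Option (Int × Int × Int))) : Decidable (Spec_has_any_representable_composition table n out) := by unfold Spec_has_any_representable_composition; infer_instance

-- ===== CLAIM (what is proved, stated in full; the proofs are below) =====
def Claim_equal_has_any_representable_composition : Prop := ∀ (table : List (List Int)) (n : Int), Dom_has_any_representable_composition table n → Pre_has_any_representable_composition table n → Spec_has_any_representable_composition table n (has_any_representable_composition table n)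

-- ===== LEMMAS AND PROOFS =====

-- The keep-first dict build looked up at r is: first carried value, else first a in l
-- whose row equals r.
theorem pvDict_get (row : Int → List Int) :
    ∀ (l : List Int) (d : PySem.Dict (List Int) Int) (r : List Int),
      (l.foldl (fun d a => if d.contains (row a) then d else d.insert (row a) a) d).get? r
        = (d.get? r).or (l.find? (fun a => row a == r)) := by
  intro l
  induction l with
  | nil => intro d r; simp
  | cons a l ih =>
    intro d r
    simp only [List.foldl_cons, List.find?]
    by_cases hc : d.contains (row a) = true
    · simp only [hc, if_true, ih]
      by_cases hr : row a == r
      · have : d.get? r ≠ none := by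
          intro h
          rw [PySem.Dict.get?_eq_none_iff_contains] at h
          rw [eq_of_beq hr] at hc
          simp [hc] at h
        cases hd : d.get? r with
        | none => exact absurd hd this
        | some v => simp [hr]
      · simp [hr]
    · rw [if_neg hc, ih, PySem.Dict.get?_insert]
      by_cases hr : r = row a
      · have hb : (row a == r) = true := by simp [hr]
        have hd : d.get? r = none := by
          rw [PySem.Dict.get?_eq_none_iff_contains, hr]
          simpa using hc
        subst hr
        simp [hb, hd]
      · have hb : (row a == r) = false := by
          simp [beq_iff_eq]; exact fun h => hr h.symm
        simp [hr, hb]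

-- ===== VERDICT (by name: the statement is the Claim_ definition above) =====
theorem has_any_representable_composition_spec : Claim_equal_has_any_representable_composition := by
  intro table n _ _
  unfold Spec_has_any_representable_composition
  unfold has_any_representable_composition has_any_representable_composition_alt
  have key : ∀ r, (pvDictA table n (PySem.List.pyRange 2 n 1)).get? r
      = (PySem.List.pyRange 0 n 1).find?
          (fun a => (PySem.List.pyRange 2 n 1).map (fun x => pvT table a x) == r) := by
    intro r
    unfold pvDictA
    rw [pvDict_get (pvRowA table (PySem.List.pyRange 2 n 1))]
    simp [pvRowA]
  simp only [key]
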